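-- pv_equiv track=rewrite | github.com/wyg5208/weclaw | src/tools/pdf_tool.py | _parse_page_list
-- ===== SOURCE A (Python) =====
-- def _parse_page_list(pages_str: str, total_pages: int) -> list[int]:
--     """解析页码列表字符串，如 '1,3,5'。
--
--     Args:
--         pages_str: 页码列表字符串
--         total_pages: PDF 总页数
--
--     Returns:
--         页码列表（1-based）
--     """
--     pages = []
--     parts = pages_str.split(",")
--
--     for part in parts:
--         part = part.strip()
--         try:
--             page = int(part)
--             if 1 <= page <= total_pages:
--                 pages.append(page)
--         except ValueError:
--             continue
--
--     # 去重但保持顺序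
--     seen = set()
--     result = []
--     for p in pages:
--         if p not in seen:
--             seen.add(p)
--             result.append(p)
--     return result
-- ===== SOURCE B (Python) =====
-- def _parse_page_list(pages_str: str, total_pages: int) -> list[int]:
--     """Back-to-front pass with no set: walk the parts in reverse; on each valid
--     page, prepend it and drop any later occurrence already in the result.
--     Order by first occurrence, same as A, without a seen-set or a second pass."""
--     result = []
--     for part in reversed(pages_str.split(",")):
--         try:
--             page = int(part.strip())
--         except ValueError:
--             continue
--         if 1 <= page <= total_pages:
--             result = [page] + [q for q in result if q != page]
--     return result
-- ===== Notes on version B (the rewrite author's own statement) =====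
-- stated objective: alternative
-- what changed: Replaces A's forward two-pass seen-set algorithm with a set-free backward pass: iterate the parts in reverse and, for each valid page, prepend it while filtering out its later occurrence from the accumulator, which yields first-occurrence order without any seen set or intermediate pages list.
import Mathlib
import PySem

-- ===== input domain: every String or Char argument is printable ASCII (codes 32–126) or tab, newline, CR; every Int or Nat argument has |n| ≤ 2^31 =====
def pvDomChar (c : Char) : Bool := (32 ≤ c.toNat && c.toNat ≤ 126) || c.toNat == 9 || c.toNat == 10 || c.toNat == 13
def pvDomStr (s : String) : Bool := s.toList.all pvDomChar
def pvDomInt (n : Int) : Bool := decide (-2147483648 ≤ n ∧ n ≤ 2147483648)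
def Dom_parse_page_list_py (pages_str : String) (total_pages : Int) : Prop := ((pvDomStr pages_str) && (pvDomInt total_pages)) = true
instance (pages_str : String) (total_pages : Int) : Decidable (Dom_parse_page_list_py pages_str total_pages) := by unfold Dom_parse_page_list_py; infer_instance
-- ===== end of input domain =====

-- B replaces A's forward two-pass (collect, then seen-set dedup) with a set-free backward pass
-- that prepends each valid page and filters out its later occurrence; objective: alternative.


-- ===== PORT A =====
def parse_page_list_py (pages_str : String) (total_pages : Int) : List Int :=
  let parts := (PySem.Str.split? pages_str ",").getD []
  let pages := parts.foldl (fun pages part =>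
    match PySem.Int.ofStr? (PySem.Str.strip part) with
    | some page => if 1 ≤ page ∧ page ≤ total_pages then pages ++ [page] else pages
    | none => pages) []
  let st := pages.foldl (fun (st : PySem.Set Int × List Int) p =>
    if st.1.contains p = false then (PySem.Set.add st.1 p, st.2 ++ [p]) else st)
    (PySem.Set.empty, [])
  st.2

-- ===== PORT B =====
def parse_page_list_py_alt (pages_str : String) (total_pages : Int) : List Int :=
  (((PySem.Str.split? pages_str ",").getD []).reverse).foldl
    (fun (result : List Int) part =>
      match PySem.Int.ofStr? (PySem.Str.strip part) with
      | none => result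
      | some page =>
        if 1 ≤ page ∧ page ≤ total_pages
        then [page] ++ result.filter (fun q => q != page) else result)
    []

-- ===== PRECONDITION & SPEC =====
def Spec_parse_page_list_py (pages_str : String) (total_pages : Int) (out : List Int) : Prop := out = parse_page_list_py_alt pages_str total_pages
instance (pages_str : String) (total_pages : Int) (out : List Int) : Decidable (Spec_parse_page_list_py pages_str total_pages out) := by unfold Spec_parse_page_list_py; infer_instance

-- ===== CLAIM (what is proved, stated in full; the proofs are below) =====
def Claim_equal_parse_page_list_py : Prop := ∀ (pages_str : String) (total_pages : Int), Dom_parse_page_list_py pages_str total_pages → Spec_parse_page_list_py pages_str total_pages (parse_page_list_py pages_str total_pages)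

-- ===== LEMMAS AND PROOFS =====

-- the list of valid in-range pages that A's first loop collects
def pvPagesOf (t : Int) (parts : List String) : List Int :=
  parts.filterMap (fun part =>
    match PySem.Int.ofStr? (PySem.Str.strip part) with
    | some page => if 1 ≤ page ∧ page ≤ t then some page else none
    | none => none)

-- A's first loop computes pvPagesOf.
lemma collect_eq_pagesOf (t : Int) (parts : List String) (acc : List Int) :
    parts.foldl (fun pages part =>
      match PySem.Int.ofStr? (PySem.Str.strip part) with
      | some page => if 1 ≤ page ∧ page ≤ t then pages ++ [page] else pages
      | none => pages) acc = acc ++ pvPagesOf t parts := by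
  induction parts generalizing acc with
  | nil => simp [pvPagesOf]
  | cons p ps ih =>
    simp only [List.foldl_cons, pvPagesOf, List.filterMap_cons]
    cases h : PySem.Int.ofStr? (PySem.Str.strip p) with
    | none => simpa [pvPagesOf] using ih acc
    | some page =>
      by_cases hp : 1 ≤ page ∧ page ≤ t
      · simp only [if_pos hp]
        rw [ih (acc ++ [page])]
        simp [pvPagesOf]
      · simp only [if_neg hp]
        simpa [pvPagesOf] using ih acc

-- A's dedup loop relativised to the seen set s
def pvDedup (s : PySem.Set Int) : List Int → List Int
  | [] => []
  | p :: ps => if s.contains p = true then pvDedup s ps else p :: pvDedup (PySem.Set.add s p) ps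

-- A's dedup loop, from any state, appends pvDedup of the pages not yet seen.
lemma dedup_fold_eq (l : List Int) (s : PySem.Set Int) (acc : List Int) :
    (l.foldl (fun (st : PySem.Set Int × List Int) p =>
      if st.1.contains p = false then (PySem.Set.add st.1 p, st.2 ++ [p]) else st)
      (s, acc)).2 = acc ++ pvDedup s l := by
  induction l generalizing s acc with
  | nil => simp [pvDedup]
  | cons p ps ih =>
    simp only [List.foldl_cons, pvDedup]
    cases hc : s.contains p with
    | true =>
      rw [if_neg (by decide), if_pos rfl]
      exact ih s acc
    | false =>
      rw [if_pos rfl, if_neg (by decide)]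
      rw [ih (PySem.Set.add s p) (acc ++ [p])]
      simp

-- B's loop over the reversed parts is the right fold of prepend-and-filter over pvPagesOf.
lemma alt_fold_eq_foldr (t : Int) (parts : List String) :
    (parts.reverse).foldl
      (fun (result : List Int) part =>
        match PySem.Int.ofStr? (PySem.Str.strip part) with
        | none => result
        | some page =>
          if 1 ≤ page ∧ page ≤ t
          then [page] ++ result.filter (fun q => q != page) else result)
      []
    = (pvPagesOf t parts).foldr (fun page result => page :: result.filter (fun q => q != page)) [] := by
  rw [List.foldl_reverse]
  induction parts with
  | nil => simp [pvPagesOf]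
  | cons p ps ih =>
    simp only [List.foldr_cons, pvPagesOf, List.filterMap_cons]
    cases h : PySem.Int.ofStr? (PySem.Str.strip p) with
    | none => simpa [pvPagesOf] using ih
    | some page =>
      by_cases hp : 1 ≤ page ∧ page ≤ t
      · simp only [if_pos hp, List.foldr_cons]
        rw [ih]; rfl
      · simp only [if_neg hp]
        simpa [pvPagesOf] using ih

-- membership in a Set after adding a fresh element
lemma contains_add_eq (s : PySem.Set Int) (p x : Int) (hp : s.contains p = false) :
    (PySem.Set.add s p).contains x = (s.contains x || x == p) := by
  simp only [PySem.Set.add, hp]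
  simp only [Bool.false_eq_true, reduceIte, PySem.Set.contains_eq_listContains,
    List.contains_eq_mem, List.mem_append, List.mem_cons, List.not_mem_nil, or_false,
    Bool.decide_or]
  by_cases hxp : x = p <;> simp [hxp]

-- core: the seen-set dedup equals the foldr of prepend-and-filter, relativised to s.
lemma dedup_eq_foldr_filter (l : List Int) (s : PySem.Set Int) :
    pvDedup s l
      = (l.foldr (fun page result => page :: result.filter (fun q => q != page)) []).filter
          (fun x => !s.contains x) := by
  induction l generalizing s with
  | nil => simp [pvDedup]
  | cons p ps ih =>
    simp only [pvDedup, List.foldr_cons, List.filter_cons]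
    cases hc : s.contains p with
    | true =>
      rw [if_pos rfl]
      simp only [Bool.not_true, Bool.false_eq_true, reduceIte]
      rw [ih s, List.filter_filter]
      apply List.filter_congr
      intro x _
      cases hx : s.contains x with
      | true => simp
      | false =>
        have hxp : (x == p) = false := by
          cases hb : x == p with
          | false => rfl
          | true =>
            have : x = p := by simpa using hb
            rw [this] at hx; rw [hx] at hc; cases hc
        simp only [hxp, bne, Bool.not_false, Bool.and_true]
    | false =>
      rw [if_neg (by simp)]
      simp only [Bool.not_false, reduceIte]
      rw [ih (PySem.Set.add s p), List.filter_filter]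
      congr 1
      apply List.filter_congr
      intro x _
      rw [contains_add_eq s p x hc]
      cases hs : s.contains x <;> cases hb : x == p <;> simp_all

-- the two ports agree for any parts list and bound
lemma ports_agree (t : Int) (parts : List String) :
    ((parts.foldl (fun pages part =>
        match PySem.Int.ofStr? (PySem.Str.strip part) with
        | some page => if 1 ≤ page ∧ page ≤ t then pages ++ [page] else pages
        | none => pages) []).foldl (fun (st : PySem.Set Int × List Int) p =>
        if st.1.contains p = false then (PySem.Set.add st.1 p, st.2 ++ [p]) else st)
        (PySem.Set.empty, [])).2
    = (parts.reverse).foldl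
      (fun (result : List Int) part =>
        match PySem.Int.ofStr? (PySem.Str.strip part) with
        | none => result
        | some page =>
          if 1 ≤ page ∧ page ≤ t
          then [page] ++ result.filter (fun q => q != page) else result)
      [] := by
  rw [collect_eq_pagesOf, List.nil_append, dedup_fold_eq, List.nil_append,
    alt_fold_eq_foldr, dedup_eq_foldr_filter]
  simp [PySem.Set.empty]

-- ===== VERDICT (by name: the statement is the Claim_ definition above) =====
theorem parse_page_list_py_spec : Claim_equal_parse_page_list_py := by
  intro pages_str total_pages _
  unfold Spec_parse_page_list_py parse_page_list_py parse_page_list_py_alt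
  exact ports_agree total_pages ((PySem.Str.split? pages_str ",").getD [])
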